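-- pv_equiv track=rewrite | github.com/ClausHofman/practice1 | versions/v5.py | count_unique_words
-- ===== SOURCE A (Python) =====
-- import string
--
-- def count_unique_words(input_string):
--     alphabet = set(string.ascii_letters)
--     words = set()
--     current_word = []
--
--     for char in input_string:
--         if char in alphabet or char == "'":
--             current_word.append(char)
--         else:
--             if current_word:
--                 words.add(''.join(current_word).lower())
--                 current_word = []
--
--     if current_word:
--         words.add(''.join(current_word).lower())
--
--     return len(words)
-- ===== SOURCE B (Python) =====
-- def count_unique_words(input_string):
--     cleaned = ''.join(
--         c if (c.isascii() and c.isalpha()) or c == "'" else ' '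
--         for c in input_string
--     )
--     return len({w.lower() for w in cleaned.split()})
-- ===== Notes on version B (the rewrite author's own statement) =====
-- stated objective: idiomatic
-- what changed: Replaces the manual buffer-and-flush character loop with masking every non-word character to a space and then using str.split() plus a set comprehension of lowercased tokens.
import Mathlib
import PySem

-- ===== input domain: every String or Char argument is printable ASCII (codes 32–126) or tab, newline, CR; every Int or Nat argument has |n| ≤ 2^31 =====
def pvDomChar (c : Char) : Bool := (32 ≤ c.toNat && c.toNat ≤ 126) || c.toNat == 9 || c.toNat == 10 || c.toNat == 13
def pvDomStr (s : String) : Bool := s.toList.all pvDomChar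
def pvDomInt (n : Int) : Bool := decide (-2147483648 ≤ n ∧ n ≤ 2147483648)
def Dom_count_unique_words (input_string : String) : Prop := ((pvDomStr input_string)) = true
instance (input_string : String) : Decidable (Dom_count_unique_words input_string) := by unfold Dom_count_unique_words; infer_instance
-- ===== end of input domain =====

-- B replaces A's manual buffer-and-flush loop by masking non-word characters to spaces,
-- splitting on whitespace, and counting the set of lowercased tokens (idiomatic; same cost).

-- ===== PORT A =====
-- membership in set(string.ascii_letters)
def pvAsciiLetterA (c : Char) : Bool :=
  (decide ('A' ≤ c) && decide (c ≤ 'Z')) || (decide ('a' ≤ c) && decide (c ≤ 'z'))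

-- one iteration of A's for-loop; state = (words, current_word)
def pvStepA (st : PySem.Set String × List Char) (c : Char) : PySem.Set String × List Char :=
  if pvAsciiLetterA c || c == '\'' then (st.1, st.2 ++ [c])
  else if st.2.isEmpty then st
  else (PySem.Set.add st.1 (PySem.Str.lower (String.ofList st.2)), [])

def count_unique_words (input_string : String) : Int :=
  let st := input_string.toList.foldl pvStepA (PySem.Set.empty, [])
  let words := if st.2.isEmpty then st.1
               else PySem.Set.add st.1 (PySem.Str.lower (String.ofList st.2))
  (words.length : Int)

-- ===== PORT B =====
-- (c.isascii() and c.isalpha()) or c == "'"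
def pvWordB (c : Char) : Bool :=
  (decide (c.toNat ≤ 127) && PySem.Chars.isalpha c) || c == '\''

def count_unique_words_alt (input_string : String) : Int :=
  let cleaned := String.ofList (input_string.toList.map (fun c => if pvWordB c then c else ' '))
  ((PySem.Set.ofList ((PySem.Str.split₀ cleaned).map PySem.Str.lower)).length : Int)

-- ===== PRECONDITION & SPEC =====
def Spec_count_unique_words (input_string : String) (out : Int) : Prop := out = count_unique_words_alt input_string
instance (input_string : String) (out : Int) : Decidable (Spec_count_unique_words input_string out) := by unfold Spec_count_unique_words; infer_instance

-- ===== CLAIM (what is proved, stated in full; the proofs are below) =====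
def Claim_equal_count_unique_words : Prop := ∀ (input_string : String), Dom_count_unique_words input_string → Spec_count_unique_words input_string (count_unique_words input_string)

-- ===== LEMMAS AND PROOFS =====

-- the token list both programs implicitly compute: maximal runs of word characters
def pvToks (cur : List Char) : List Char → List (List Char)
  | [] => if cur.isEmpty then [] else [cur]
  | c :: rest =>
      if pvAsciiLetterA c || c == '\'' then pvToks (cur ++ [c]) rest
      else if cur.isEmpty then pvToks [] rest
      else cur :: pvToks [] rest

theorem pvWord_bounds (c : Char) (h : (pvAsciiLetterA c || c == '\'') = true) :
    c.toNat = 39 ∨ (65 ≤ c.toNat ∧ c.toNat ≤ 90) ∨ (97 ≤ c.toNat ∧ c.toNat ≤ 122) := by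
  simp only [pvAsciiLetterA, Bool.or_eq_true, Bool.and_eq_true, decide_eq_true_iff,
    beq_iff_eq] at h
  rcases h with ((⟨h1, h2⟩ | ⟨h1, h2⟩) | h)
  · right; left
    exact ⟨le_trans (by decide) (Fin.mk_le_mk.mp h1), le_trans (Fin.mk_le_mk.mp h2) (by decide)⟩
  · right; right
    exact ⟨le_trans (by decide) (Fin.mk_le_mk.mp h1), le_trans (Fin.mk_le_mk.mp h2) (by decide)⟩
  · left; subst h; decide

theorem pvWordB_eq (c : Char) : pvWordB c = (pvAsciiLetterA c || c == '\'') := by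
  have hiso : PySem.Chars.isalpha c = pvAsciiLetterA c := rfl
  unfold pvWordB
  rw [hiso]
  cases hA : pvAsciiLetterA c with
  | false => simp
  | true =>
    have h2 : c.toNat ≤ 127 := by
      rcases pvWord_bounds c (by simp [hA]) with h | h | h <;> omega
    simp [h2]

theorem pvWord_not_space (c : Char) (h : (pvAsciiLetterA c || c == '\'') = true) :
    PySem.Chars.isspace c = false := by
  have hb := pvWord_bounds c h
  by_contra hne
  have hsp : PySem.Chars.isspace c = true := by
    revert hne; cases PySem.Chars.isspace c <;> simp
  simp only [PySem.Chars.isspace, Bool.or_eq_true, Bool.and_eq_true, decide_eq_true_iff] at hsp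
  omega

theorem pvSplit_go (cs cur acc) :
    PySem.Chars.split₀.go
        (cs.map (fun c => if pvWordB c then c else ' ')) cur acc
      = acc.reverse ++ pvToks cur.reverse cs := by
  induction cs generalizing cur acc with
  | nil =>
      simp only [List.map_nil, PySem.Chars.split₀.go, pvToks, List.isEmpty_reverse]
      by_cases h : cur.isEmpty <;> simp [h]
  | cons c rest ih =>
      cases hw : (pvAsciiLetterA c || c == '\'') with
      | true =>
          have hb : pvWordB c = true := by rw [pvWordB_eq, hw]
          have hs := pvWord_not_space c hw
          simp only [List.map_cons, PySem.Chars.split₀.go, pvToks, hb, hs, hw, if_true,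
            Bool.false_eq_true, if_false, ih (c :: cur) acc, List.reverse_cons]
      | false =>
          have hb : pvWordB c = false := by rw [pvWordB_eq, hw]
          have hs : PySem.Chars.isspace ' ' = true := by decide
          simp only [List.map_cons, PySem.Chars.split₀.go, pvToks, hb, hs, hw, if_true,
            Bool.false_eq_true, if_false, List.isEmpty_reverse]
          by_cases hc : cur.isEmpty
          · simp [hc, ih [] acc]
          · simp [hc, ih [] (cur.reverse :: acc)]

-- A's final flush of current_word
def pvFin (st : PySem.Set String × List Char) : PySem.Set String :=
  if st.2.isEmpty then st.1 else PySem.Set.add st.1 (PySem.Str.lower (String.ofList st.2))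

theorem pvFoldA (cs : List Char) (w : PySem.Set String) (cur : List Char) :
    pvFin (cs.foldl pvStepA (w, cur))
      = ((pvToks cur cs).map (fun t => PySem.Str.lower (String.ofList t))).foldl
          PySem.Set.add w := by
  induction cs generalizing w cur with
  | nil =>
      simp only [List.foldl_nil, pvToks, pvFin]
      by_cases h : cur.isEmpty <;> simp [h]
  | cons c rest ih =>
      cases hw : (pvAsciiLetterA c || c == '\'') with
      | true =>
          simp only [List.foldl_cons, pvToks, pvStepA, hw, if_true, ih]
      | false =>
          simp only [List.foldl_cons, pvToks, pvStepA, hw, Bool.false_eq_true, if_false]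
          by_cases hc : cur.isEmpty
          · simp [List.isEmpty_iff.mp hc, ih]
          · simp only [hc, Bool.false_eq_true, if_false, List.map_cons, List.foldl_cons, ih]

theorem count_unique_words_eq (s : String) :
    count_unique_words s = count_unique_words_alt s := by
  simp only [count_unique_words, count_unique_words_alt, PySem.Str.split₀,
    PySem.Chars.split₀, PySem.Set.ofList_eq_foldl, String.toList_ofList]
  rw [pvSplit_go s.toList [] []]
  have h := pvFoldA s.toList PySem.Set.empty []
  simp only [pvFin, List.reverse_nil, List.nil_append, PySem.Set.empty] at h ⊢
  rw [h]
  simp [List.foldl_map, Function.comp, PySem.Str.lower]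

-- ===== VERDICT (by name: the statement is the Claim_ definition above) =====
theorem count_unique_words_spec : Claim_equal_count_unique_words := by
  intro s _
  exact count_unique_words_eq s
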